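-- pv_equiv track=rewrite | github.com/electricalboy1991/Python_for_CodingTest_Pycharm | 2_Greedy_316p.py | solution
-- ===== SOURCE A (Python) =====
-- def solution(food_times, k):
--     turn = 0
--     while k != 0:
--         if list(set(food_times)) == [0]:
--             answer =-1
--             return answer
--
--         if food_times[turn] >= 1:
--             food_times[turn] -= 1
--             turn += 1
--             turn %= len(food_times)
--             k -= 1
--         else:
--             turn += 1
--             turn %= len(food_times)
--
--     answer = turn + 1
--     return answer
-- ===== SOURCE B (Python) =====
-- def solution(food_times, k):
--     # Bulk simulation: instead of eating one unit per step, repeatedly remove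
--     # whole rounds (min remaining level across all still-positive foods) at once.
--     # Note: unlike A, this does not mutate food_times (return value only).
--     if k == 0:
--         return 1
--     n = len(food_times)
--     remaining = [i for i, t in enumerate(food_times) if t > 0]
--     level = 0
--     while remaining:
--         m = min(food_times[i] for i in remaining) - level
--         cnt = len(remaining)
--         if k > m * cnt:
--             k -= m * cnt
--             level += m
--             remaining = [i for i in remaining if food_times[i] - (level) > 0]
--         else:
--             return (remaining[(k - 1) % cnt] + 1) % n + 1
--     return -1
-- ===== Notes on version B (the rewrite author's own statement) =====
-- stated objective: faster
-- what changed: A eats one unit per loop iteration (O(k*n) iterations, mutating the list); B removes whole rounds in bulk: it keeps the list of still-positive indices, repeatedly subtracts (min remaining level)*count from k at once and drops the exhausted foods, then lands the k-th bite by a modulus into the surviving index list.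
-- outside the precondition, e.g. on solution([1], -1): A returns -1, B returns 1; on solution([-1], 1): A does not finish within the time limit, B returns -1
import Mathlib
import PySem

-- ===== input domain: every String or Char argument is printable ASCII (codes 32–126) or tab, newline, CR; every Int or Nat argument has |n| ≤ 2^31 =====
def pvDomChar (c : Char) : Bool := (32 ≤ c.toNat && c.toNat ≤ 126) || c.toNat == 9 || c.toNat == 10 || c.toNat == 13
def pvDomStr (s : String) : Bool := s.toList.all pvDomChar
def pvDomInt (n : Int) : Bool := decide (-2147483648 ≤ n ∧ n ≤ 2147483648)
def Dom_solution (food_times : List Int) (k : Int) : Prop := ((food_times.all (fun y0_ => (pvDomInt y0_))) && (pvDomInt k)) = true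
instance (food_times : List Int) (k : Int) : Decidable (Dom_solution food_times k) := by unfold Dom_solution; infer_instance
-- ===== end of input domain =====

-- B replaces A's one-unit-per-step O(k·n) eating simulation by bulk removal of whole
-- rounds (min positive level at a time): objective = faster. A mutates food_times in
-- place; B does not — the equivalence proved here is about the RETURN value only.

-- ===== PORT A =====
-- A's while-loop, one fuel unit per iteration; the fuel given by `solution` below is
-- provably enough on every input admitted by Pre_solution (the loop runs at most
-- (k+1)*(n+1) iterations there).  `PySem.Set.ofList food_times = [0]` is exactly
-- Python's `list(set(food_times)) == [0]` (a one-element set prints in one order).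
def loopA : Nat → List Int → Int → Int → Int
  | 0, _, _, _ => 0
  | fuel + 1, ft, turn, k =>
    if k = 0 then turn + 1
    else if PySem.Set.ofList ft = [(0 : Int)] then -1
    else
      match PySem.List.pyGet? ft turn with
      | none => 0  -- IndexError (empty list); excluded by Pre_solution
      | some v =>
        if 1 ≤ v then
          loopA fuel (PySem.List.pySetD ft turn (v - 1))
            (PySem.Int.mod (turn + 1) (ft.length : Int)) (k - 1)
        else
          loopA fuel ft (PySem.Int.mod (turn + 1) (ft.length : Int)) k

def solution (food_times : List Int) (k : Int) : Int :=
  loopA ((k.toNat + 1) * (food_times.length + 1) + 1) food_times 0 k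

-- ===== PORT B =====
-- Source B's while-loop over (remaining, level, k); each iteration strictly shrinks
-- `remaining`, so fuel n+1 is provably enough.  Indices in `remaining` are always
-- in range, so pyGetD is exact here.
def loopB (n : Int) (ft : List Int) : Nat → List Int → Int → Int → Int
  | 0, _, _, _ => 0
  | fuel + 1, remaining, level, k =>
    match remaining with
    | [] => -1
    | r :: rs =>
      let m := (PySem.List.min? ((r :: rs).map (fun i => PySem.List.pyGetD ft i 0)) (fun x => x)).getD 0 - level
      let cnt : Int := ((r :: rs).length : Int)
      if m * cnt < k then
        loopB n ft fuel
          ((r :: rs).filter (fun i => decide (0 < PySem.List.pyGetD ft i 0 - (level + m))))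
          (level + m) (k - m * cnt)
      else
        PySem.Int.mod (PySem.List.pyGetD (r :: rs) (PySem.Int.mod (k - 1) cnt) 0 + 1) n + 1

def solution_alt (food_times : List Int) (k : Int) : Int :=
  if k = 0 then 1
  else
    loopB (food_times.length : Int) food_times (food_times.length + 1)
      (((PySem.List.enumerate food_times 0).filter (fun p => decide (0 < p.2))).map Prod.fst)
      0 k

-- ===== PRECONDITION & SPEC =====
-- sum of the positive parts of the entries (closed form; used only to state Pre_)
def possum (g : List Int) : Int := (g.map (fun x => max x 0)).sum

-- Pre_ excludes: the empty list with k ≠ 0 (A raises IndexError there, B returns -1);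
-- negative k, and
-- negative entries when k exceeds the sum of the positive entries (inputs outside the
-- problem's natural domain, on which A either busy-loops all food down to zero and
-- returns -1 or never terminates).
def Pre_solution (food_times : List Int) (k : Int) : Prop :=
  0 ≤ k ∧ (food_times = [] → k = 0) ∧
    ((∀ x ∈ food_times, 0 ≤ x) ∨ k ≤ possum food_times)
instance (food_times : List Int) (k : Int) : Decidable (Pre_solution food_times k) := by
  unfold Pre_solution; infer_instance

def pvWitness_solution : List Int × Int := ([3, 1, 2], 5)

def Spec_solution (food_times : List Int) (k : Int) (out : Int) : Prop := out = solution_alt food_times k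
instance (food_times : List Int) (k : Int) (out : Int) : Decidable (Spec_solution food_times k out) := by unfold Spec_solution; infer_instance

-- ===== CLAIM (what is proved, stated in full; the proofs are below) =====
def Claim_equal_solution : Prop := ∀ (food_times : List Int) (k : Int), Dom_solution food_times k → Pre_solution food_times k → Spec_solution food_times k (solution food_times k)

-- ===== LEMMAS AND PROOFS =====

-- indices (as Python ints) of the still-positive foods from offset t, in index order
def posFrom : List Int → Int → List Int
  | [], _ => []
  | x :: xs, t => if 1 ≤ x then t :: posFrom xs (t + 1) else posFrom xs (t + 1)

-- one full round of eating: every positive food loses one unit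
def decAll (g : List Int) : List Int := g.map (fun x => if 1 ≤ x then x - 1 else x)

-- reference function: both ports are proved equal to it (k = number of bites left, ≥ 1)
def Rref (ft : List Int) (k : Nat) : Int :=
  if _h1 : (posFrom ft 0).length = 0 then -1
  else if _h2 : k ≤ (posFrom ft 0).length then
    PySem.Int.mod ((posFrom ft 0).getD (k - 1) 0 + 1) (ft.length : Int) + 1
  else Rref (decAll ft) (k - (posFrom ft 0).length)
termination_by k
decreasing_by omega

theorem length_decAll (g : List Int) : (decAll g).length = g.length := by
  simp [decAll]

theorem decAll_getD (g : List Int) (j : Nat) :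
    (decAll g).getD j 0 = if 1 ≤ g.getD j 0 then g.getD j 0 - 1 else g.getD j 0 := by
  induction g generalizing j with
  | nil => simp [decAll]
  | cons x xs ih =>
    cases j with
    | zero => simp [decAll]
    | succ j => simpa [decAll] using ih j

theorem mem_posFrom (g : List Int) (t i : Int) :
    i ∈ posFrom g t ↔ ∃ j : Nat, j < g.length ∧ i = t + j ∧ 1 ≤ g.getD j 0 := by
  induction g generalizing t with
  | nil => simp [posFrom]
  | cons x xs ih =>
    constructor
    · intro hm
      simp only [posFrom] at hm
      split_ifs at hm with hx
      · rcases List.mem_cons.1 hm with h | h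
        · exact ⟨0, by simp, by simpa using h, by simpa using hx⟩
        · rcases (ih (t + 1)).1 h with ⟨j, hj, hi, hpos⟩
          exact ⟨j + 1, by simpa using hj, by omega, by simpa using hpos⟩
      · rcases (ih (t + 1)).1 hm with ⟨j, hj, hi, hpos⟩
        exact ⟨j + 1, by simpa using hj, by omega, by simpa using hpos⟩
    · rintro ⟨j, hj, hi, hpos⟩
      simp only [posFrom]
      cases j with
      | zero =>
        simp only [List.getD_cons_zero] at hpos
        simp [hpos, hi]
      | succ j =>
        have : i ∈ posFrom xs (t + 1) :=
          (ih (t + 1)).2 ⟨j, by simpa using hj, by omega, by simpa using hpos⟩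
        split_ifs <;> simp [this]

theorem posFrom_length (g : List Int) (t : Int) :
    (posFrom g t).length = g.countP (fun x => decide (1 ≤ x)) := by
  induction g generalizing t with
  | nil => simp [posFrom]
  | cons x xs ih =>
    by_cases hx : 1 ≤ x <;> simp [posFrom, hx, ih]

theorem posFrom_eq_nil_iff (g : List Int) (t : Int) :
    posFrom g t = [] ↔ ∀ x ∈ g, ¬ 1 ≤ x := by
  rw [← List.length_eq_zero_iff, posFrom_length, List.countP_eq_zero]
  simp

theorem posFrom_decAll (g : List Int) (t : Int) (h : ∀ x ∈ g, 1 ≤ x → 2 ≤ x) :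
    posFrom (decAll g) t = posFrom g t := by
  induction g generalizing t with
  | nil => rfl
  | cons x xs ih =>
    have hx := h x (by simp)
    have htl : ∀ x ∈ xs, 1 ≤ x → 2 ≤ x := fun y hy => h y (by simp [hy])
    by_cases h1 : 1 ≤ x
    · have h2 : (1:Int) ≤ x - 1 := by have := hx h1; omega
      simp only [decAll, List.map_cons, posFrom, h1, h2, if_true]
      exact congrArg _ (ih _ htl)
    · simp only [decAll, List.map_cons, posFrom, h1, if_false]
      exact ih _ htl

theorem possum_decAll (g : List Int) :
    possum (decAll g) = possum g - (g.countP (fun x => decide (1 ≤ x)) : Int) := by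
  induction g with
  | nil => simp [possum, decAll]
  | cons x xs ih =>
    have ih' := ih
    simp only [possum, decAll, List.map_cons, List.map_map, List.sum_cons,
      List.countP_cons] at ih' ⊢
    rw [ih']
    by_cases hx : 1 ≤ x <;> simp [hx] <;> omega

theorem possum_nonpos_of_no_pos (g : List Int) (h : ∀ x ∈ g, ¬ 1 ≤ x) : possum g ≤ 0 := by
  induction g with
  | nil => simp [possum]
  | cons x xs ih =>
    have := h x (by simp)
    have h2 := ih (fun y hy => h y (by simp [hy]))
    simp only [possum, List.map_cons, List.sum_cons] at *
    omega

theorem decAll_nonneg (g : List Int) (h : ∀ x ∈ g, 0 ≤ x) : ∀ x ∈ decAll g, 0 ≤ x := by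
  intro x hx
  rcases List.mem_map.1 hx with ⟨y, hy, rfl⟩
  have := h y hy
  split_ifs <;> omega

theorem ofList_zero_iff (g : List Int) :
    PySem.Set.ofList g = [(0 : Int)] ↔ g ≠ [] ∧ ∀ x ∈ g, x = 0 := by
  constructor
  · intro h
    constructor
    · intro hnil; rw [hnil] at h; simp [PySem.Set.ofList] at h
    · intro x hx
      have : x ∈ PySem.Set.ofList g := (PySem.Set.mem_ofList g x).2 hx
      rw [h] at this; simpa using this
  · rintro ⟨hne, hall⟩
    cases g with
    | nil => exact absurd rfl hne
    | cons x xs =>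
      have hx : x = 0 := hall x (by simp)
      subst hx
      have hxs : ∀ x ∈ xs, x = 0 := fun y hy => hall y (by simp [hy])
      rw [PySem.Set.ofList_eq_foldl]
      simp only [List.foldl_cons]
      have hadd : PySem.Set.add ([] : PySem.Set Int) 0 = [0] := by decide
      rw [hadd]
      clear hall hne
      induction xs with
      | nil => rfl
      | cons y ys ih =>
        have hy : y = 0 := hxs y (by simp)
        subst hy
        have : PySem.Set.add ([0] : PySem.Set Int) 0 = [0] := by decide
        simp only [List.foldl_cons, this]
        exact ih (fun z hz => hxs z (by simp [hz]))

theorem Rref_neg (ft : List Int) (k : Nat) (h : (posFrom ft 0).length = 0) :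
    Rref ft k = -1 := by
  rw [Rref]; simp [h]

theorem Rref_hit (ft : List Int) (k : Nat) (h : (posFrom ft 0).length ≠ 0)
    (hk : k ≤ (posFrom ft 0).length) :
    Rref ft k = PySem.Int.mod ((posFrom ft 0).getD (k - 1) 0 + 1) (ft.length : Int) + 1 := by
  rw [Rref]; simp [h, hk]

theorem Rref_step (ft : List Int) (k : Nat) (h : (posFrom ft 0).length ≠ 0)
    (hk : ¬ k ≤ (posFrom ft 0).length) :
    Rref ft k = Rref (decAll ft) (k - (posFrom ft 0).length) := by
  rw [Rref]; simp [h, hk]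

theorem decIter_length (g : List Int) (l : Nat) : (decAll^[l] g).length = g.length := by
  induction l with
  | zero => rfl
  | succ l ih => rw [Function.iterate_succ_apply', length_decAll, ih]

theorem decIter_getD (g : List Int) (l j : Nat) :
    (decAll^[l] g).getD j 0 =
      if (l : Int) ≤ g.getD j 0 then g.getD j 0 - l
      else if 0 ≤ g.getD j 0 then 0 else g.getD j 0 := by
  induction l with
  | zero => simp only [Function.iterate_zero, id]; split_ifs <;> omega
  | succ l ih =>
    rw [Function.iterate_succ_apply', decAll_getD, ih]
    push_cast
    split_ifs <;> omega

theorem two_le_of_pointwise (g : List Int) (m : Int) (hm : 2 ≤ m)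
    (h : ∀ j : Nat, 1 ≤ g.getD j 0 → m ≤ g.getD j 0) :
    ∀ x ∈ g, 1 ≤ x → 2 ≤ x := by
  intro x hx h1
  rcases List.mem_iff_getElem.1 hx with ⟨j, hj, rfl⟩
  have := h j (by rwa [List.getD_eq_getElem g 0 hj])
  rw [List.getD_eq_getElem g 0 hj] at this
  omega

theorem R_unroll (mN : Nat) : ∀ (g : List Int) (kn : Nat), 0 < mN →
    (posFrom g 0).length ≠ 0 →
    (∀ j : Nat, 1 ≤ g.getD j 0 → (mN : Int) ≤ g.getD j 0) →
    (posFrom g 0).length * mN < kn →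
    Rref g kn = Rref (decAll^[mN] g) (kn - (posFrom g 0).length * mN) := by
  induction mN with
  | zero => omega
  | succ mN ih =>
    intro g kn _ hc hpt hlt
    have hcle : (posFrom g 0).length ≤ (posFrom g 0).length * (mN + 1) :=
      Nat.le_mul_of_pos_right _ (by omega)
    have hstep := Rref_step g kn hc (by omega)
    rcases Nat.eq_zero_or_pos mN with hm0 | hm1
    · subst hm0
      rw [hstep]
      simp
    · have h2 : ∀ x ∈ g, 1 ≤ x → 2 ≤ x :=
        two_le_of_pointwise g ((mN + 1 : Nat) : Int) (by push_cast; omega) hpt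
      have hstable : posFrom (decAll g) 0 = posFrom g 0 := posFrom_decAll g 0 h2
      have hpt' : ∀ j : Nat, 1 ≤ (decAll g).getD j 0 → (mN : Int) ≤ (decAll g).getD j 0 := by
        intro j hj
        have hd := decAll_getD g j
        by_cases h1 : 1 ≤ g.getD j 0
        · have := hpt j h1; push_cast at this ⊢; rw [hd] at hj ⊢; split_ifs <;> omega
        · rw [hd, if_neg h1] at hj; exact absurd hj h1
      have hmul : (posFrom g 0).length * (mN + 1) =
          (posFrom g 0).length * mN + (posFrom g 0).length := by ring
      rw [hstep, ih (decAll g) (kn - (posFrom g 0).length) (by omega)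
        (by rw [hstable]; exact hc) hpt' (by rw [hstable]; omega)]
      rw [hstable, ← Function.iterate_succ_apply]
      congr 1
      omega

theorem R_land (mN : Nat) : ∀ (g : List Int) (kn : Nat), 0 < kn →
    (∀ j : Nat, 1 ≤ g.getD j 0 → (mN : Int) ≤ g.getD j 0) →
    (posFrom g 0).length ≠ 0 →
    kn ≤ (posFrom g 0).length * mN →
    Rref g kn = PySem.Int.mod
      ((posFrom g 0).getD ((kn - 1) % (posFrom g 0).length) 0 + 1) (g.length : Int) + 1 := by
  induction mN with
  | zero => omega
  | succ mN ih =>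
    intro g kn hkn hpt hc hle
    by_cases hk : kn ≤ (posFrom g 0).length
    · rw [Rref_hit g kn hc hk, Nat.mod_eq_of_lt (by omega)]
    · have hm1 : 0 < mN := by
        by_contra h
        have : mN = 0 := by omega
        subst this
        simp at hle
        omega
      have h2 : ∀ x ∈ g, 1 ≤ x → 2 ≤ x :=
        two_le_of_pointwise g ((mN + 1 : Nat) : Int) (by push_cast; omega) hpt
      have hstable : posFrom (decAll g) 0 = posFrom g 0 := posFrom_decAll g 0 h2
      have hpt' : ∀ j : Nat, 1 ≤ (decAll g).getD j 0 → (mN : Int) ≤ (decAll g).getD j 0 := by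
        intro j hj
        have hd := decAll_getD g j
        by_cases h1 : 1 ≤ g.getD j 0
        · have := hpt j h1; push_cast at this ⊢; rw [hd] at hj ⊢; split_ifs <;> omega
        · rw [hd, if_neg h1] at hj; exact absurd hj h1
      have hmul : (posFrom g 0).length * (mN + 1) =
          (posFrom g 0).length * mN + (posFrom g 0).length := by ring
      rw [Rref_step g kn hc hk,
        ih (decAll g) (kn - (posFrom g 0).length) (by omega) hpt'
          (by rw [hstable]; exact hc) (by rw [hstable]; omega)]
      rw [hstable, length_decAll]
      have hidx : (kn - (posFrom g 0).length - 1) % (posFrom g 0).length =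
          (kn - 1) % (posFrom g 0).length := by
        have h1 : kn - 1 = (kn - (posFrom g 0).length - 1) + (posFrom g 0).length := by omega
        rw [h1, Nat.add_mod_right]
      rw [hidx]

theorem posFrom_filter (g : List Int) : ∀ (g' : List Int) (t : Int) (q : Int → Bool),
    g.length = g'.length →
    (∀ j : Nat, j < g.length → ((1 ≤ g'.getD j 0) ↔ (1 ≤ g.getD j 0 ∧ q (t + j) = true))) →
    posFrom g' t = (posFrom g t).filter q := by
  induction g with
  | nil =>
    intro g' t q hlen _
    have : g' = [] := List.length_eq_zero_iff.1 hlen.symm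
    subst this; rfl
  | cons x xs ih =>
    intro g' t q hlen hpt
    cases g' with
    | nil => simp at hlen
    | cons x' xs' =>
      have h0 := hpt 0 (by simp)
      simp only [List.getD_cons_zero, Nat.cast_zero, add_zero] at h0
      have hrec : ∀ j : Nat, j < xs.length →
          ((1 ≤ xs'.getD j 0) ↔ (1 ≤ xs.getD j 0 ∧ q ((t + 1) + j) = true)) := by
        intro j hj
        have := hpt (j + 1) (by simp; omega)
        simp only [List.getD_cons_succ] at this
        have harg : t + ((j : Nat) + 1 : Nat) = (t + 1) + (j : Nat) := by push_cast; ring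
        rwa [harg] at this
      have htl := ih xs' (t + 1) q (by simpa using hlen) hrec
      by_cases hx' : 1 ≤ x'
      · obtain ⟨hx, hq⟩ := h0.1 hx'
        simp [posFrom, hx', hx, hq, htl]
      · by_cases hx : 1 ≤ x
        · have hq : q t = false := by
            by_contra h
            exact hx' (h0.2 ⟨hx, by simpa using h⟩)
          simp [posFrom, hx', hx, hq, htl]
        · simp [posFrom, hx', hx, htl]

theorem init_remaining (g : List Int) : ∀ s : Int,
    (((PySem.List.enumerate g s).filter (fun p => decide (0 < p.2))).map Prod.fst)
      = posFrom g s := by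
  induction g with
  | nil => intro s; simp [PySem.List.enumerate_nil, posFrom]
  | cons x xs ih =>
    intro s
    rw [PySem.List.enumerate_cons]
    by_cases hx : (0 : Int) < x
    · have h1 : (1 : Int) ≤ x := by omega
      simp [posFrom, hx, h1, ih (s + 1)]
    · have h1 : ¬ (1 : Int) ≤ x := by omega
      simp [posFrom, hx, h1, ih (s + 1)]

theorem Binv : ∀ (fuel : Nat) (ft : List Int) (l kn : Nat) (remaining : List Int),
    remaining = posFrom (decAll^[l] ft) 0 → 1 ≤ kn → remaining.length < fuel →
    loopB (ft.length : Int) ft fuel remaining (l : Int) (kn : Int)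
      = Rref (decAll^[l] ft) kn := by
  intro fuel
  induction fuel with
  | zero => intro ft l kn remaining _ _ h; omega
  | succ fuel ih =>
    intro ft l kn remaining hrem hkn hfuel
    cases remaining with
    | nil =>
      rw [loopB, Rref_neg]
      rw [← hrem]
      rfl
    | cons r rs =>
      -- facts about members of `remaining`
      have hmem : ∀ i ∈ r :: rs, ∃ j : Nat, j < ft.length ∧ i = (j : Int) ∧
          (l : Int) ≤ ft.getD j 0 ∧
          (decAll^[l] ft).getD j 0 = ft.getD j 0 - l ∧ 1 ≤ ft.getD j 0 - l := by
        intro i hi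
        rw [hrem] at hi
        rcases (mem_posFrom _ 0 i).1 hi with ⟨j, hj, hij, hpos⟩
        rw [decIter_length] at hj
        have hd := decIter_getD ft l j
        rw [hd] at hpos
        refine ⟨j, hj, by omega, ?_, ?_, ?_⟩ <;> (split_ifs at hpos <;> [skip; omega; omega])
        · omega
        · rw [hd]; split_ifs <;> omega
        · omega
      -- the min of the remaining current levels
      have hne : ((r :: rs).map (fun i => PySem.List.pyGetD ft i 0)) ≠ [] := by simp
      obtain ⟨M, hM⟩ : ∃ M, PySem.List.min?
          ((r :: rs).map (fun i => PySem.List.pyGetD ft i 0)) (fun x => x) = some M := by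
        cases hopt : PySem.List.min?
            ((r :: rs).map (fun i => PySem.List.pyGetD ft i 0)) (fun x => x) with
        | none => exact absurd ((PySem.List.min?_eq_none_iff _ _).1 hopt) hne
        | some M => exact ⟨M, rfl⟩
      have hval : ∀ i ∈ r :: rs, PySem.List.pyGetD ft i 0 =
          (decAll^[l] ft).getD i.toNat 0 + l ∧ 1 ≤ (decAll^[l] ft).getD i.toNat 0 := by
        intro i hi
        rcases hmem i hi with ⟨j, hj, rfl, h1, h2, h3⟩
        rw [PySem.List.pyGetD_natCast, Int.toNat_natCast]
        exact ⟨by omega, by omega⟩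
      obtain ⟨i₀, hi₀, hMi₀⟩ : ∃ i₀ ∈ r :: rs, M = PySem.List.pyGetD ft i₀ 0 := by
        rcases List.mem_map.1 (PySem.List.min?_mem hM) with ⟨i₀, hi₀, hM0⟩
        exact ⟨i₀, hi₀, hM0.symm⟩
      have hMle : ∀ i ∈ r :: rs, M ≤ PySem.List.pyGetD ft i 0 := by
        intro i hi
        exact PySem.List.min?_isMin hM _ (List.mem_map.2 ⟨i, hi, rfl⟩)
      have hm1 : 1 ≤ M - l := by
        rcases hval i₀ hi₀ with ⟨he, hp⟩
        omega
      -- pointwise bound: every positive entry of the current state is ≥ M - l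
      have hpt : ∀ j : Nat, 1 ≤ (decAll^[l] ft).getD j 0 →
          (M - l) ≤ (decAll^[l] ft).getD j 0 := by
        intro j hj
        have hjlt : j < ft.length := by
          by_contra h
          rw [List.getD_eq_default _ 0 (by rw [decIter_length]; omega)] at hj
          omega
        have hjmem : ((j : Nat) : Int) ∈ r :: rs := by
          rw [hrem]
          exact (mem_posFrom _ 0 _).2 ⟨j, by rw [decIter_length]; omega, by omega, hj⟩
        rcases hval _ hjmem with ⟨he, _⟩
        have := hMle _ hjmem
        rw [he] at this
        simp only [Int.toNat_natCast] at this he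
        omega
      have hcnt : (r :: rs).length = (posFrom (decAll^[l] ft) 0).length := by rw [hrem]
      have hcne : (posFrom (decAll^[l] ft) 0).length ≠ 0 := by
        rw [← hcnt]; simp
      set mN : Nat := (M - l).toNat with hmN
      have hmcast : ((mN : Nat) : Int) = M - (l : Int) := by omega
      -- unfold one loopB step
      rw [loopB]
      simp only [hM, Option.getD_some]
      set c : Nat := (r :: rs).length with hc
      by_cases hbr : (M - (l : Int)) * ((r :: rs).length : Int) < (kn : Int)
      · rw [if_pos hbr]
        have hltN : (posFrom (decAll^[l] ft) 0).length * mN < kn := by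
          rw [← hcnt]
          have : ((c * mN : Nat) : Int) < (kn : Int) := by push_cast; rw [hmcast]; linarith [hbr]
          exact_mod_cast this
        -- the new remaining list is the positive set after mN more whole rounds
        have hnew : ((r :: rs).filter
              (fun i => decide (0 < PySem.List.pyGetD ft i 0 - ((l : Int) + (M - l))))) =
            posFrom (decAll^[l + mN] ft) 0 := by
          rw [hrem]
          rw [show l + mN = mN + l from by omega, Function.iterate_add_apply]
          refine (posFrom_filter (decAll^[l] ft) (decAll^[mN] (decAll^[l] ft)) 0 _
            (by simp [decIter_length]) ?_).symm
          intro j hj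
          have hd := decIter_getD (decAll^[l] ft) mN j
          have hd2 := decIter_getD ft l j
          rw [decIter_length] at hj
          have hpg : PySem.List.pyGetD ft ((j : Nat) : Int) 0 = ft.getD j 0 :=
            PySem.List.pyGetD_natCast ..
          constructor
          · intro h1
            have hpos : 1 ≤ (decAll^[l] ft).getD j 0 := by
              rw [hd] at h1; split_ifs at h1 <;> omega
            refine ⟨hpos, ?_⟩
            rw [zero_add, hpg]
            simp only [decide_eq_true_iff]
            rw [hd, hd2] at h1
            rw [hd2] at hpos
            split_ifs at hpos h1 <;> omega
          · rintro ⟨hpos, hq⟩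
            rw [zero_add, hpg] at hq
            simp only [decide_eq_true_iff] at hq
            rw [hd, hd2]
            rw [hd2] at hpos
            split_ifs at hpos ⊢ <;> omega
        have hshrink : ((r :: rs).filter
              (fun i => decide (0 < PySem.List.pyGetD ft i 0 - ((l : Int) + (M - l))))).length
            < (r :: rs).length := by
          refine List.length_filter_lt_length_iff_exists.2 ⟨i₀, hi₀, ?_⟩
          simp only [decide_eq_true_iff]
          omega
        have hrw1 : (l : Int) + (M - l) = ((l + mN : Nat) : Int) := by push_cast; omega
        have hx1 : mN * c < kn := by
          rw [← hcnt] at hltN; rw [Nat.mul_comm]; exact hltN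
        have hcast2 : ((mN * c : Nat) : Int) = (mN : Int) * (c : Int) := by push_cast; ring
        have hx2 : ((kn - mN * c : Nat) : Int) = (kn : Int) - ((mN * c : Nat) : Int) := by
          omega
        have hrw2 : (kn : Int) - (M - (l : Int)) * ((r :: rs).length : Int)
            = ((kn - mN * c : Nat) : Int) := by
          rw [hx2, hcast2, hmcast, hc]
        rw [hrw1] at hnew hshrink
        rw [hrw1, hrw2, hnew]
        have hiter : decAll^[l + mN] ft = decAll^[mN] (decAll^[l] ft) := by
          rw [show l + mN = mN + l from by omega, Function.iterate_add_apply]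
        rw [R_unroll mN (decAll^[l] ft) kn (by omega) hcne
          (by rw [hmcast]; exact hpt) hltN, ← hiter]
        have hknc : kn - (posFrom (decAll^[l] ft) 0).length * mN = kn - mN * c := by
          rw [← hcnt, Nat.mul_comm]
        rw [hknc]
        refine ih ft (l + mN) (kn - mN * c) _ rfl (by omega) ?_
        rw [← hnew]
        calc (List.filter _ (r :: rs)).length < (r :: rs).length := hshrink
          _ ≤ fuel := by rw [← hc]; omega
      · rw [if_neg hbr]
        have hleN : kn ≤ (posFrom (decAll^[l] ft) 0).length * mN := by
          rw [← hcnt]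
          have : (kn : Int) ≤ ((c * mN : Nat) : Int) := by push_cast; rw [hmcast]; linarith [not_lt.1 hbr]
          exact_mod_cast this
        rw [R_land mN _ kn (by omega) (by rw [← hmcast] at hpt; exact hpt) hcne hleN]
        rw [decIter_length]
        congr 2
        have hcpos : (0 : Int) < ((r :: rs).length : Int) := by
          exact_mod_cast Nat.succ_pos rs.length
        rw [PySem.Int.mod_eq_emod_of_pos hcpos]
        have h1 : (kn : Int) - 1 = ((kn - 1 : Nat) : Int) := by omega
        rw [h1, Int.ofNat_mod_ofNat, PySem.List.pyGetD_natCast]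
        rw [show (r :: rs).length = c from hc.symm, hcnt, hrem]

theorem loopA_succ (fuel : Nat) (ft : List Int) (turn k : Int) :
    loopA (fuel + 1) ft turn k =
      (if k = 0 then turn + 1
      else if PySem.Set.ofList ft = [(0 : Int)] then -1
      else
        match PySem.List.pyGet? ft turn with
        | none => 0
        | some v =>
          if 1 ≤ v then
            loopA fuel (PySem.List.pySetD ft turn (v - 1))
              (PySem.Int.mod (turn + 1) (ft.length : Int)) (k - 1)
          else
            loopA fuel ft (PySem.Int.mod (turn + 1) (ft.length : Int)) k) := rfl

theorem decAll_cons (x : Int) (xs : List Int) :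
    decAll (x :: xs) = (if 1 ≤ x then x - 1 else x) :: decAll xs := rfl

theorem decAll_of_no_pos (g : List Int) (h : ∀ x ∈ g, ¬ 1 ≤ x) : decAll g = g := by
  unfold decAll
  rw [List.map_congr_left (g := id) (fun x hx => by simp [h x hx]), List.map_id]

theorem pyGet_at (ft : List Int) (t : Nat) (ht : t < ft.length) :
    PySem.List.pyGet? ft ((t : Nat) : Int) = some ft[t] := by
  rw [PySem.List.pyGet?_natCast, List.getElem?_eq_getElem ht]

theorem mod_cast_lt (t n : Nat) (h : t + 1 < n) :
    PySem.Int.mod (((t : Nat) : Int) + 1) ((n : Nat) : Int) = (((t + 1 : Nat)) : Int) := by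
  rw [PySem.Int.mod_eq_emod_of_pos (by exact_mod_cast (by omega : 0 < n))]
  have h1 : ((t : Int) + 1) = ((t + 1 : Nat) : Int) := by push_cast; ring
  rw [h1]
  exact Int.emod_eq_of_lt (by positivity) (by exact_mod_cast h)

theorem mod_cast_self (n : Nat) (h : 0 < n) :
    PySem.Int.mod ((n : Nat) : Int) ((n : Nat) : Int) = 0 := by
  rw [PySem.Int.mod_eq_emod_of_pos (by exact_mod_cast h), Int.emod_self]

theorem ofList_ne_zero_of_pos (ft : List Int) (x : Int) (hx : x ∈ ft) (h1 : 1 ≤ x) :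
    PySem.Set.ofList ft ≠ [(0 : Int)] := by
  intro hz
  have := ((ofList_zero_iff ft).1 hz).2 x hx
  omega

-- one full sweep of A's loop from turn t to the end of the list: each positive food is
-- eaten once, the turn wraps to 0
theorem roundLemma : ∀ (d : Nat) (ft : List Int) (t fuel : Nat) (k : Int),
    t + d = ft.length → 0 < d → 1 ≤ fuel →
    ((posFrom (ft.drop t) (t : Int)).length : Int) < k →
    loopA (fuel + d) ft (t : Int) k
      = loopA fuel (ft.take t ++ decAll (ft.drop t)) 0
          (k - ((posFrom (ft.drop t) (t : Int)).length : Int)) := by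
  intro d
  induction d with
  | zero => omega
  | succ d ih =>
    intro ft t fuel k hlen hd hfuel hlt
    have ht : t < ft.length := by omega
    have hdrop : ft.drop t = ft[t] :: ft.drop (t + 1) := List.drop_eq_getElem_cons ht
    have hk0 : ¬ ((k : Int) = 0) := by
      have : (0 : Int) ≤ ((posFrom (ft.drop t) (t : Int)).length : Int) := by positivity
      omega
    rw [show fuel + (d + 1) = (fuel + d) + 1 from rfl, loopA_succ, if_neg hk0]
    by_cases hz : PySem.Set.ofList ft = [(0 : Int)]
    · rw [if_pos hz]
      have hall := ((ofList_zero_iff ft).1 hz).2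
      have hnp : ∀ x ∈ ft.drop t, ¬ (1 : Int) ≤ x := by
        intro x hx
        have := hall x (List.mem_of_mem_drop hx)
        omega
      rw [(posFrom_eq_nil_iff _ _).2 hnp, decAll_of_no_pos _ hnp, List.take_append_drop]
      obtain ⟨f, rfl⟩ : ∃ f, fuel = f + 1 := ⟨fuel - 1, by omega⟩
      rw [loopA_succ]
      simp [hk0, hz]
    · rw [if_neg hz]
      rw [pyGet_at ft t ht]
      set v := ft[t] with hv
      have hset : PySem.List.pySetD ft ((t : Nat) : Int) (v - 1) = ft.set t (v - 1) :=
        PySem.List.pySetD_natCast ..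
      rcases Nat.eq_zero_or_pos d with hd0 | hdpos
      · -- last position of the sweep: the turn wraps to 0
        subst hd0
        have htn : t + 1 = ft.length := by omega
        have hdropn : ft.drop (t + 1) = [] := by
          apply List.drop_eq_nil_of_le; omega
        have hmod : PySem.Int.mod (((t : Nat) : Int) + 1) ((ft.length : Nat) : Int) = 0 := by
          have h1 : ((t : Int) + 1) = ((ft.length : Nat) : Int) := by
            rw [← htn]; push_cast; ring
          rw [h1, mod_cast_self _ (by omega)]
        by_cases hpv : (1 : Int) ≤ v
        · have hP : posFrom (ft.drop t) (t : Int) = [(t : Int)] := by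
            rw [hdrop, hdropn]; simp [posFrom, hpv]
          have hD : ft.take t ++ decAll (ft.drop t) = ft.set t (v - 1) := by
            rw [hdrop, hdropn, List.set_eq_take_cons_drop _ ht, show (t+1) = ft.length from htn,
              List.drop_length]
            simp [decAll, hpv]
          simp only [hpv, if_true, hset, hmod, hP, hD]
          norm_num
        · have hP : posFrom (ft.drop t) (t : Int) = [] := by
            rw [hdrop, hdropn]; simp [posFrom, hpv]
          have hD : ft.take t ++ decAll (ft.drop t) = ft := by
            rw [hdrop, hdropn]
            simp only [decAll, List.map_cons, List.map_nil, if_neg hpv]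
            rw [show [v] = ft.drop t from by rw [hdrop, hdropn], List.take_append_drop]
          simp only [hpv, if_false, hmod, hP, hD]
          norm_num
      · -- middle of the sweep: recurse at turn t+1
        have htn : t + 1 < ft.length := by omega
        have hmod : PySem.Int.mod (((t : Nat) : Int) + 1) ((ft.length : Nat) : Int)
            = (((t + 1 : Nat)) : Int) := mod_cast_lt t ft.length htn
        by_cases hpv : (1 : Int) ≤ v
        · have hP : posFrom (ft.drop t) (t : Int)
              = (t : Int) :: posFrom (ft.drop (t + 1)) ((t + 1 : Nat) : Int) := by
            rw [hdrop]
            simp only [posFrom, if_pos hpv]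
            norm_num
          have hset2 : (ft.set t (v - 1)).drop (t + 1) = ft.drop (t + 1) :=
            List.drop_set_of_lt (by omega)
          have ihres := ih (ft.set t (v - 1)) (t + 1) fuel (k - 1)
            (by rw [List.length_set]; omega) hdpos hfuel
            (by rw [hset2]
                have : ((posFrom (ft.drop t) (t : Int)).length : Int)
                    = ((posFrom (ft.drop (t+1)) ((t+1 : Nat) : Int)).length : Int) + 1 := by
                  rw [hP]; push_cast [List.length_cons]; ring
                omega)
          simp only [hpv, if_true, hset, hmod]
          rw [ihres, hset2]
          have hD : (ft.set t (v - 1)).take (t + 1) ++ decAll (ft.drop (t + 1))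
              = ft.take t ++ decAll (ft.drop t) := by
            rw [List.set_eq_take_cons_drop _ ht,
              show t + 1 = (ft.take t).length + 1 from by rw [List.length_take]; omega,
              List.take_length_add_append, hdrop, decAll_cons, if_pos hpv]
            simp [Nat.min_eq_left ht.le]
          rw [hD]
          have hcnt : ((posFrom (ft.drop t) (t : Int)).length : Int)
              = ((posFrom (ft.drop (t+1)) ((t+1 : Nat) : Int)).length : Int) + 1 := by
            rw [hP]; push_cast [List.length_cons]; ring
          congr 1
          omega
        · have hP : posFrom (ft.drop t) (t : Int)
              = posFrom (ft.drop (t + 1)) ((t + 1 : Nat) : Int) := by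
            rw [hdrop]
            simp only [posFrom, if_neg hpv]
            norm_num
          have ihres := ih ft (t + 1) fuel k (by omega) hdpos hfuel
            (by rw [← hP]; exact hlt)
          simp only [hpv, if_false, hmod]
          rw [ihres]
          have hD : ft.take (t + 1) ++ decAll (ft.drop (t + 1))
              = ft.take t ++ decAll (ft.drop t) := by
            rw [List.take_succ_eq_append_getElem ht, hdrop, decAll_cons, if_neg hpv, ← hv]
            simp
          rw [hD, hP]

-- the final partial sweep: the k-th bite lands on the k-th still-positive index ≥ t,
-- and the loop exits returning the following turn + 1
theorem lastRound : ∀ (d : Nat) (ft : List Int) (t fuel : Nat) (k : Int),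
    t + d = ft.length → 1 ≤ fuel → 1 ≤ k →
    k ≤ ((posFrom (ft.drop t) (t : Int)).length : Int) →
    loopA (fuel + d) ft (t : Int) k
      = PySem.Int.mod ((posFrom (ft.drop t) (t : Int)).getD (k.toNat - 1) 0 + 1)
          (ft.length : Int) + 1 := by
  intro d
  induction d with
  | zero =>
    intro ft t fuel k hlen _ hk hle
    have hnil : ft.drop t = [] := List.drop_eq_nil_of_le (by omega)
    rw [hnil] at hle
    simp [posFrom] at hle
    omega
  | succ d ih =>
    intro ft t fuel k hlen hfuel hk hle
    have ht : t < ft.length := by omega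
    have hdrop : ft.drop t = ft[t] :: ft.drop (t + 1) := List.drop_eq_getElem_cons ht
    have hk0 : ¬ ((k : Int) = 0) := by omega
    -- some food ahead is positive, so the all-zero test cannot fire
    have hz : ¬ PySem.Set.ofList ft = [(0 : Int)] := by
      have hne : posFrom (ft.drop t) (t : Int) ≠ [] := by
        intro h; rw [h] at hle; simp at hle; omega
      obtain ⟨x, hx, h1⟩ : ∃ x ∈ ft.drop t, (1 : Int) ≤ x := by
        by_contra hno
        simp only [not_exists, not_and, not_le] at hno
        exact hne ((posFrom_eq_nil_iff _ _).2 (by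
          intro x hx
          have := hno x hx
          omega))
      exact ofList_ne_zero_of_pos ft x (List.mem_of_mem_drop hx) h1
    rw [show fuel + (d + 1) = (fuel + d) + 1 from rfl, loopA_succ, if_neg hk0, if_neg hz,
      pyGet_at ft t ht]
    set v := ft[t] with hv
    have hset : PySem.List.pySetD ft ((t : Nat) : Int) (v - 1) = ft.set t (v - 1) :=
      PySem.List.pySetD_natCast ..
    by_cases hpv : (1 : Int) ≤ v
    · have hP : posFrom (ft.drop t) (t : Int)
          = (t : Int) :: posFrom (ft.drop (t + 1)) ((t + 1 : Nat) : Int) := by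
        rw [hdrop]
        simp only [posFrom, if_pos hpv]
        norm_num
      by_cases hk1 : k = 1
      · -- this is the k-th bite: one more iteration returns the next turn + 1
        subst hk1
        obtain ⟨f, rfl⟩ : ∃ f, fuel = f + 1 := ⟨fuel - 1, by omega⟩
        simp only [hpv, if_true, hset]
        rw [show f + 1 + d = (f + d) + 1 from by omega, loopA_succ, if_pos (by norm_num)]
        rw [hP]
        simp
      · -- more bites to go: recurse at turn t+1
        have hcnt : ((posFrom (ft.drop t) (t : Int)).length : Int)
            = ((posFrom (ft.drop (t+1)) ((t+1 : Nat) : Int)).length : Int) + 1 := by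
          rw [hP]; push_cast [List.length_cons]; ring
        have htn : t + 1 < ft.length := by
          by_contra hcon
          have hnil : ft.drop (t + 1) = [] := List.drop_eq_nil_of_le (by omega)
          rw [hnil] at hcnt
          simp only [posFrom, List.length_nil, Nat.cast_zero, zero_add] at hcnt
          omega
        have hmod : PySem.Int.mod (((t : Nat) : Int) + 1) ((ft.length : Nat) : Int)
            = (((t + 1 : Nat)) : Int) := mod_cast_lt t ft.length htn
        have hset2 : (ft.set t (v - 1)).drop (t + 1) = ft.drop (t + 1) :=
          List.drop_set_of_lt (by omega)
        have ihres := ih (ft.set t (v - 1)) (t + 1) fuel (k - 1)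
          (by rw [List.length_set]; omega) hfuel (by omega)
          (by rw [hset2]; omega)
        simp only [hpv, if_true, hset, hmod]
        rw [ihres, hset2, List.length_set, hP]
        have hidx : k.toNat - 1 = ((k - 1).toNat - 1) + 1 := by omega
        rw [hidx, List.getD_cons_succ]
    · have hP : posFrom (ft.drop t) (t : Int)
          = posFrom (ft.drop (t + 1)) ((t + 1 : Nat) : Int) := by
        rw [hdrop]
        simp only [posFrom, if_neg hpv]
        norm_num
      have htn : t + 1 < ft.length := by
        by_contra hcon
        have hnil : ft.drop (t + 1) = [] := List.drop_eq_nil_of_le (by omega)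
        rw [hP, hnil] at hle
        simp [posFrom] at hle
        omega
      have hmod : PySem.Int.mod (((t : Nat) : Int) + 1) ((ft.length : Nat) : Int)
          = (((t + 1 : Nat)) : Int) := mod_cast_lt t ft.length htn
      have ihres := ih ft (t + 1) fuel k (by omega) hfuel hk (by rw [← hP]; exact hle)
      simp only [hpv, if_false, hmod]
      rw [ihres, hP]

theorem A_char : ∀ (kn : Nat) (ft : List Int) (fuel : Nat), ft ≠ [] → 1 ≤ kn →
    ((∀ x ∈ ft, 0 ≤ x) ∨ (kn : Int) ≤ possum ft) →
    (kn + 1) * (ft.length + 1) + 1 ≤ fuel →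
    loopA fuel ft 0 (kn : Int) = Rref ft kn := by
  intro kn
  induction kn using Nat.strong_induction_on with
  | _ kn IH =>
    intro ft fuel hne hkn hH hfuel
    have hn1 : 1 ≤ ft.length := List.length_pos_of_ne_nil hne
    have h0d : (0 : Int) = ((0 : Nat) : Int) := rfl
    have hdr : ft.drop 0 = ft := by simp
    set c : Nat := (posFrom ft 0).length with hc
    rcases Nat.eq_zero_or_pos c with hc0 | hcpos
    · -- no positive food: A hits the all-zero test (or k exceeds the positive sum)
      have hnp : ∀ x ∈ ft, ¬ (1 : Int) ≤ x := by
        have := (posFrom_eq_nil_iff ft 0).1 (List.length_eq_zero_iff.1 hc0)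
        exact this
      rcases hH with hpos | hsum
      · have hall : ∀ x ∈ ft, x = 0 := by
          intro x hx
          have h1 := hpos x hx
          have h2 := hnp x hx
          omega
        have hz : PySem.Set.ofList ft = [(0 : Int)] := (ofList_zero_iff ft).2 ⟨hne, hall⟩
        obtain ⟨f, rfl⟩ : ∃ f, fuel = f + 1 := ⟨fuel - 1, by omega⟩
        rw [loopA_succ, if_neg (by omega), if_pos hz, Rref_neg ft kn (by omega)]
      · have := possum_nonpos_of_no_pos ft hnp
        omega
    · by_cases hle : kn ≤ c
      · -- the k-th bite happens during this sweep
        obtain ⟨f, hf⟩ : ∃ f, fuel = f + ft.length ∧ 1 ≤ f := by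
          have hbig : ft.length + 1 ≤ (kn + 1) * (ft.length + 1) :=
            Nat.le_mul_of_pos_left _ (by omega)
          exact ⟨fuel - ft.length, by omega, by omega⟩
        rw [hf.1, h0d, lastRound ft.length ft 0 f (kn : Int) (by omega) hf.2
          (by exact_mod_cast hkn) (by rw [hdr, ← h0d, ← hc]; exact_mod_cast hle)]
        rw [Rref_hit ft kn (by omega) hle]
        rw [hdr, ← h0d, Int.toNat_natCast]
      · -- a full sweep happens: recurse with kn - c bites
        have hgt : c < kn := by omega
        have hcInt : ((posFrom (ft.drop 0) ((0 : Nat) : Int)).length : Int) = (c : Int) := by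
          rw [hdr, ← h0d, ← hc]
        obtain ⟨f, hf⟩ : ∃ f, fuel = f + ft.length ∧
            (kn - c + 1) * (ft.length + 1) + 1 ≤ f := by
          have hbig : ft.length + 1 ≤ (kn + 1) * (ft.length + 1) :=
            Nat.le_mul_of_pos_left _ (by omega)
          refine ⟨fuel - ft.length, by omega, ?_⟩
          have h1 : (kn - c + 1) * (ft.length + 1) ≤ kn * (ft.length + 1) :=
            Nat.mul_le_mul_right _ (by omega)
          have h2 : (kn + 1) * (ft.length + 1) = kn * (ft.length + 1) + (ft.length + 1) := by
            ring
          omega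
        rw [hf.1, h0d, roundLemma ft.length ft 0 f (kn : Int) (by omega) (by omega)
          (by omega) (by rw [hcInt]; exact_mod_cast hgt)]
        rw [hcInt]
        have hcast : (kn : Int) - (c : Int) = ((kn - c : Nat) : Int) := by omega
        rw [show ft.take 0 ++ decAll (ft.drop 0) = decAll ft from by simp [hdr], hcast]
        have hne' : decAll ft ≠ [] := by
          intro h
          apply hne
          have hlen0 := congrArg List.length h
          rw [length_decAll] at hlen0
          exact List.length_eq_zero_iff.1 (by simpa using hlen0)
        have hH' : (∀ x ∈ decAll ft, 0 ≤ x) ∨ ((kn - c : Nat) : Int) ≤ possum (decAll ft) := by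
          rcases hH with hpos | hsum
          · exact Or.inl (decAll_nonneg ft hpos)
          · right
            rw [possum_decAll, ← posFrom_length (t := 0), ← hc]
            omega
        rw [IH (kn - c) (by omega) (decAll ft) f hne' (by omega) hH'
          (by rw [length_decAll]; exact hf.2)]
        rw [Rref_step ft kn (by omega) (by omega)]

theorem B_char : ∀ (kn : Nat) (ft : List Int), 1 ≤ kn →
    loopB (ft.length : Int) ft (ft.length + 1)
      (((PySem.List.enumerate ft 0).filter (fun p => decide (0 < p.2))).map Prod.fst)
      0 (kn : Int) = Rref ft kn := by
  intro kn ft hkn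
  rw [init_remaining ft 0]
  have h0 : ((0 : Nat) : Int) = (0 : Int) := rfl
  have hlen : (posFrom ft 0).length < ft.length + 1 := by
    rw [posFrom_length]
    have := List.countP_le_length (l := ft) (p := fun x => decide (1 ≤ x))
    omega
  have := Binv (ft.length + 1) ft 0 kn (posFrom ft 0)
    (by simp) hkn (by simpa using hlen)
  simpa using this

-- ===== VERDICT (by name: the statement is the Claim_ definition above) =====
theorem solution_spec : Claim_equal_solution := by
  intro ft k _hdom hpre
  obtain ⟨hk, hne, hH⟩ := hpre
  unfold Spec_solution
  by_cases hk0 : k = 0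
  · subst hk0; simp [solution, solution_alt, loopA]
  · have hft : ft ≠ [] := fun h => hk0 (hne h)
    have hkn : 1 ≤ k.toNat := by omega
    have hcast : (k.toNat : Int) = k := by omega
    rw [solution, solution_alt, if_neg hk0, ← hcast]
    rw [A_char k.toNat ft _ hft hkn (by rw [hcast]; exact hH) (by rw [hcast])]
    rw [B_char k.toNat ft hkn]
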